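-- pv_equiv track=rewrite | github.com/SebGar111/DendroCalc | ddddd.py | solution
-- ===== SOURCE A (Python) =====
-- def solution(A, K):
--     n = len(A)
--     i = 0
--     for num in range(1, K+1):
--         if num not in A:
--             return False
--         while i < n and A[i] < num:
--             i += 1
--         if i == n or A[i] > num:
--             return False
--     return True
-- ===== SOURCE B (Python) =====
-- def solution(A, K):
--     expected = 1
--     for x in A:
--         if expected > K:
--             break
--         if x == expected:
--             expected += 1
--         elif x > expected:
--             return False
--     return expected > K
-- ===== Notes on version B (the rewrite author's own statement) =====
-- stated objective: simpler
-- what changed: B replaces A's loop over the value range 1..K (with a per-value `num in A` membership scan plus a pointer advanced through A) by a single pass over the elements of A maintaining an `expected` counter, dropping the membership scan entirely.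
import Mathlib
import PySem

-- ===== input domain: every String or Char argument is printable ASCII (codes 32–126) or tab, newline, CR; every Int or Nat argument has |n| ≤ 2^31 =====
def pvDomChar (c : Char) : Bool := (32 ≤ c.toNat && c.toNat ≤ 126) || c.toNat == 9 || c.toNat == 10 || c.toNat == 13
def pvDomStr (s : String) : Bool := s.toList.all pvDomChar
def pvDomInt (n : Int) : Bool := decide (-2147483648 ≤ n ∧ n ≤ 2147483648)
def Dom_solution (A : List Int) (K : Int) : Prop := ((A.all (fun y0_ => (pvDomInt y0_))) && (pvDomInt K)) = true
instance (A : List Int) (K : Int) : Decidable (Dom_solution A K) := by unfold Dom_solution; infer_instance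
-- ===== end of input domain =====

-- B replaces A's value-range loop (membership scan + pointer) by a single pass over A with an
-- `expected` counter, dropping the inner `num in A` scan; objective: simpler.


-- ===== PORT A =====
-- `while i < n and A[i] < num: i += 1`
def solAdv (A : List Int) (num : Int) (i : Nat) : Nat :=
  if h : i < A.length then
    if A[i] < num then solAdv A num (i + 1) else i
  else i
termination_by A.length - i

-- `for num in range(1, K+1)` with early returns, carried state i
def solGoA (A : List Int) (num K : Int) (i : Nat) : Bool :=
  if h : num ≤ K then
    if num ∈ A then
      let i' := solAdv A num i
      if i' = A.length ∨ A.getD i' 0 > num then false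
      else solGoA A (num + 1) K i'
    else false
  else true
termination_by (K + 1 - num).toNat
decreasing_by omega

def solution (A : List Int) (K : Int) : Bool := solGoA A 1 K 0

-- ===== PORT B =====
def solGoB (K : Int) : List Int → Int → Bool
  | [], exp => decide (exp > K)
  | x :: rest, exp =>
    if exp > K then true
    else if x = exp then solGoB K rest (exp + 1)
    else if x > exp then false
    else solGoB K rest exp

def solution_alt (A : List Int) (K : Int) : Bool := solGoB K A 1

-- ===== PRECONDITION & SPEC =====
def Spec_solution (A : List Int) (K : Int) (out : Bool) : Prop := out = solution_alt A K
instance (A : List Int) (K : Int) (out : Bool) : Decidable (Spec_solution A K out) := by unfold Spec_solution; infer_instance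

-- ===== CLAIM (what is proved, stated in full; the proofs are below) =====
def Claim_equal_solution : Prop := ∀ (A : List Int) (K : Int), Dom_solution A K → Spec_solution A K (solution A K)

-- ===== LEMMAS AND PROOFS =====

theorem solAdv_le (A : List Int) (num : Int) (i : Nat) (h : i ≤ A.length) :
    solAdv A num i ≤ A.length := by
  rw [solAdv]
  split
  · split
    · exact solAdv_le A num (i + 1) (by omega)
    · exact h
  · exact h
termination_by A.length - i

theorem solAdv_stop (A : List Int) (num : Int) (i : Nat) (hi : i ≤ A.length) :
    solAdv A num i = A.length ∨ ¬ A.getD (solAdv A num i) 0 < num := by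
  rw [solAdv]
  split
  · rename_i h
    split
    · exact solAdv_stop A num (i + 1) h
    · right; rw [List.getD_eq_getElem _ _ h]; assumption
  · rename_i h; left; omega
termination_by A.length - i

-- B returns true once expected > K
theorem solGoB_done (K : Int) (xs : List Int) (exp : Int) (h : K < exp) :
    solGoB K xs exp = true := by
  cases xs with
  | nil => simp [solGoB]; omega
  | cons x rest => simp [solGoB]; omega

-- B skips exactly the elements A's inner while skips
theorem solGoB_skip (A : List Int) (K num : Int) (i : Nat) (hnum : num ≤ K) :
    solGoB K (A.drop i) num = solGoB K (A.drop (solAdv A num i)) num := by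
  rw [solAdv]
  split
  · rename_i h
    split
    · rename_i hlt
      rw [List.drop_eq_getElem_cons h]
      have hx : ¬ (num > K) := by omega
      have h1 : ¬ (A[i] = num) := by omega
      have h2 : ¬ (A[i] > num) := by omega
      simp only [solGoB, if_neg hx, if_neg h1, if_neg h2]
      exact solGoB_skip A K num (i + 1) hnum
    · rfl
  · rfl
termination_by A.length - i

theorem solGo_eq (A : List Int) (K num : Int) (i : Nat) (hi : i ≤ A.length) :
    solGoA A num K i = solGoB K (A.drop i) num := by
  rw [solGoA]
  split
  · rename_i hnum
    rw [solGoB_skip A K num i hnum]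
    set i' := solAdv A num i with hi'
    have hle : i' ≤ A.length := solAdv_le A num i hi
    rcases Nat.lt_or_ge i' A.length with hlt | hend
    · rw [List.drop_eq_getElem_cons hlt]
      have hstop := solAdv_stop A num i hi
      rw [← hi'] at hstop
      have hge : ¬ A[i'] < num := by
        rcases hstop with h | h
        · omega
        · rwa [List.getD_eq_getElem _ _ hlt] at h
      rcases lt_or_eq_of_le (not_lt.mp hge) with hgt | heq
      · -- A[i'] > num : both false
        have hgd : A.getD i' 0 > num := by rw [List.getD_eq_getElem _ _ hlt]; exact hgt
        have hnK : ¬ (num > K) := by omega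
        have hne : ¬ (A[i'] = num) := by omega
        simp only [solGoB, if_neg hnK, if_neg hne, if_pos hgt, if_pos (Or.inr hgd)]
        split <;> rfl
      · -- A[i'] = num : both step
        have hmem : num ∈ A := heq ▸ A.getElem_mem hlt
        have hgd : ¬ (i' = A.length ∨ A.getD i' 0 > num) := by
          rw [List.getD_eq_getElem _ _ hlt]; omega
        have hnK : ¬ (num > K) := by omega
        simp only [if_pos hmem, if_neg hgd, solGoB, if_neg hnK, if_pos heq.symm]
        rw [solGo_eq A K (num + 1) i' hle]
        by_cases h1 : num + 1 ≤ K
        · -- one B-step consumes the matched element on the left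
          conv_lhs => rw [List.drop_eq_getElem_cons hlt]
          have hnK1 : ¬ (num + 1 > K) := by omega
          have hne1 : ¬ (A[i'] = num + 1) := by omega
          have hng1 : ¬ (A[i'] > num + 1) := by omega
          simp only [solGoB, if_neg hnK1, if_neg hne1, if_neg hng1]
        · rw [solGoB_done K _ _ (by omega), solGoB_done K _ _ (by omega)]
    · -- pointer ran off the end
      have hdrop : A.drop i' = [] := List.drop_eq_nil_of_le (by omega)
      have : i' = A.length := by omega
      simp only [hdrop, solGoB, if_pos (Or.inl this)]
      rw [show decide (num > K) = false from by simp; omega]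
      split <;> rfl
  · rename_i hnum
    exact (solGoB_done K _ num (by omega)).symm
termination_by (K + 1 - num).toNat
decreasing_by omega

-- ===== VERDICT (by name: the statement is the Claim_ definition above) =====
theorem solution_spec : Claim_equal_solution := by
  intro A K _
  unfold Spec_solution solution solution_alt
  simpa using solGo_eq A K 1 0 (Nat.zero_le _)
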